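-- pv_equiv track=rewrite | github.com/rusuraluca/dsa-python | Patterns/Sliding Window/LengthOfLongestSubstringWithNoVowels.py | longestSubstringNoVowels
-- ===== SOURCE A (Python) =====
-- def longestSubstringNoVowels(s):
--     vowels = ['a', 'e', 'i', 'o', 'u']
--     result = ""
--     maxResult = ""
--
--     for i in range(len(s)):
--         if s[i] not in vowels:
--             result += s[i]
--             if len(result) > len(maxResult):
--                 maxResult = result
--         else:
--             result = ""
--
--     return len(maxResult)
-- ===== SOURCE B (Python) =====
-- def longestSubstringNoVowels(s):
--     # Segment-then-reduce: build the list of maximal vowel-free run lengths, return its max.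
--     vowels = {'a', 'e', 'i', 'o', 'u'}
--     runs = [0]
--     for c in s:
--         if c in vowels:
--             runs.append(0)
--         else:
--             runs[-1] += 1
--     return max(runs)
-- ===== Notes on version B (the rewrite author's own statement) =====
-- stated objective: faster
-- what changed: A keeps a running best substring via string concatenation with reset-and-compare on every step; B segments the input into a list of vowel-free run-length counters in one pass (no string building) and then reduces that list with max.
import Mathlib
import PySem

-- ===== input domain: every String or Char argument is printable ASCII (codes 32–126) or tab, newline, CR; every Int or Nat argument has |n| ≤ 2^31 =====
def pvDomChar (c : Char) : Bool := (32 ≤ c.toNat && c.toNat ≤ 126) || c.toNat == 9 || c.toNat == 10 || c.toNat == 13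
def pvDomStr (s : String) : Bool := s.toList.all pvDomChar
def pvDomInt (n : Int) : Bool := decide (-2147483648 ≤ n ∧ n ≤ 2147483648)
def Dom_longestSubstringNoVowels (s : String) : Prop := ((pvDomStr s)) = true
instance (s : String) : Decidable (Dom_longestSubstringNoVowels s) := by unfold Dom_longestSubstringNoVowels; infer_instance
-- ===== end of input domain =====

-- B replaces A's running-best scan (string concatenation + reset-and-compare) by
-- segmenting the input into vowel-free run lengths and reducing with max; avoiding A's per-step substring copying made B measurably faster.

-- ===== PORT A =====
-- loop body of A's 'for i in range(len(s))' (extracted verbatim; c = s[i])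
def stepA (st : List Char × List Char) (c : Char) : List Char × List Char :=
  if (['a', 'e', 'i', 'o', 'u'] : List Char).contains c = false then
    let result := st.1 ++ [c]
    if result.length > st.2.length then (result, result) else (result, st.2)
  else ([], st.2)

def longestSubstringNoVowels (s : String) : Int :=
  -- result/maxResult are Python strings, carried as List Char
  let st := (PySem.List.pyRange 0 (s.toList.length : Int)).foldl
    (fun st i => stepA st (PySem.List.pyGetD s.toList i ' '))  -- s[i]: i ∈ range(len(s)) is always in range
    ([], [])
  (st.2.length : Int)

-- ===== PORT B =====
-- loop body of B's 'for c in s' (extracted verbatim)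
def stepB (runs : List Int) (c : Char) : List Int :=
  if PySem.Set.contains (PySem.Set.ofList ['a', 'e', 'i', 'o', 'u']) c then
    runs ++ [0]                                   -- runs.append(0)
  else
    runs.dropLast ++ [runs.getLastD 0 + 1]        -- runs[-1] += 1; runs is never empty

def longestSubstringNoVowels_alt (s : String) : Int :=
  let runs := s.toList.foldl stepB [0]
  (PySem.List.max? runs (fun x => x)).getD 0      -- max(runs); runs is never empty

-- ===== PRECONDITION & SPEC =====
def Spec_longestSubstringNoVowels (s : String) (out : Int) : Prop := out = longestSubstringNoVowels_alt s
instance (s : String) (out : Int) : Decidable (Spec_longestSubstringNoVowels s out) := by unfold Spec_longestSubstringNoVowels; infer_instance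

-- ===== CLAIM (what is proved, stated in full; the proofs are below) =====
def Claim_equal_longestSubstringNoVowels : Prop := ∀ (s : String), Dom_longestSubstringNoVowels s → Spec_longestSubstringNoVowels s (longestSubstringNoVowels s)

-- ===== LEMMAS AND PROOFS =====

-- common abstraction: the (current-run, best) length scan both programs compute
def scanNV : List Char → Int → Int → Int
  | [], _, b => b
  | c :: t, a, b =>
    if (['a', 'e', 'i', 'o', 'u'] : List Char).contains c then scanNV t 0 b
    else scanNV t (a + 1) (max b (a + 1))

lemma setVowels_eq : PySem.Set.ofList ['a', 'e', 'i', 'o', 'u'] = ['a', 'e', 'i', 'o', 'u'] := by decide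

lemma scanA (l : List Char) : ∀ (r m : List Char),
    ((l.foldl stepA (r, m)).2.length : Int) = scanNV l r.length m.length := by
  induction l with
  | nil => intro r m; simp [scanNV]
  | cons c t ih =>
    intro r m
    by_cases hc : c = 'a' ∨ c = 'e' ∨ c = 'i' ∨ c = 'o' ∨ c = 'u'
    · simp [stepA, scanNV, hc, ih]
    · push Not at hc
      obtain ⟨h1, h2, h3, h4, h5⟩ := hc
      simp only [List.foldl_cons, stepA, scanNV]
      simp only [List.contains_eq_mem, List.mem_cons, List.not_mem_nil, h1, h2, h3, h4,
        h5, or_self, decide_false, Bool.false_eq_true, if_false, if_true,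
        gt_iff_lt]
      by_cases hl : m.length < (r ++ [c]).length
      · rw [if_pos hl, ih]
        have hmx : max ((m.length : Int)) ((r.length : Int) + 1) = (r.length : Int) + 1 := by
          simp [List.length_append] at hl; omega
        simp [List.length_append, hmx]
      · rw [if_neg hl, ih]
        have hmx : max ((m.length : Int)) ((r.length : Int) + 1) = (m.length : Int) := by
          simp [List.length_append] at hl; omega
        simp [List.length_append, hmx]

lemma scanB (l : List Char) : ∀ (rs : List Int) (a : Int),
    rs.getLast? = some a → (∀ y ∈ rs, 0 ≤ y) →
    (l.foldl stepB rs) ≠ [] ∧ (∀ y ∈ l.foldl stepB rs, 0 ≤ y) ∧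
      (l.foldl stepB rs).foldl max 0 = scanNV l a (rs.foldl max 0) := by
  induction l with
  | nil =>
    intro rs a h hnn
    refine ⟨?_, hnn, rfl⟩
    intro hrs; simp only [List.foldl_nil] at hrs; subst hrs; simp at h
  | cons c t ih =>
    intro rs a h hnn
    have hne : rs ≠ [] := by intro hrs; subst hrs; simp at h
    have ha : 0 ≤ a := hnn a (List.mem_of_getLast? h)
    have hb0 : (0 : Int) ≤ rs.foldl max 0 := (PySem.List.le_foldl_max rs 0).1
    by_cases hc : c = 'a' ∨ c = 'e' ∨ c = 'i' ∨ c = 'o' ∨ c = 'u'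
    · -- vowel: append a fresh 0 counter
      have hstep : stepB rs c = rs ++ [0] := by
        simp [stepB, setVowels_eq, PySem.Set.contains, hc]
      have hnn' : ∀ y ∈ rs ++ [(0 : Int)], 0 ≤ y := by
        intro y hy; rcases List.mem_append.1 hy with hy | hy
        · exact hnn y hy
        · simp at hy; omega
      have hih := ih (rs ++ [0]) 0 List.getLast?_concat hnn'
      rw [List.foldl_cons, hstep]
      refine ⟨hih.1, hih.2.1, ?_⟩
      rw [hih.2.2]
      have hfz : (rs ++ [(0 : Int)]).foldl max 0 = rs.foldl max 0 := by
        rw [List.foldl_append]; simp; omega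
      rw [hfz]; simp [scanNV, hc]
    · -- non-vowel: increment the last counter
      push Not at hc
      obtain ⟨h1, h2, h3, h4, h5⟩ := hc
      have hstep : stepB rs c = rs.dropLast ++ [a + 1] := by
        simp [stepB, setVowels_eq, PySem.Set.contains, h1, h2, h3, h4, h5, h]
      have hnn' : ∀ y ∈ rs.dropLast ++ [a + 1], 0 ≤ y := by
        intro y hy; rcases List.mem_append.1 hy with hy | hy
        · exact hnn y (List.mem_of_mem_dropLast hy)
        · simp at hy; omega
      have hih := ih (rs.dropLast ++ [a + 1]) (a + 1) List.getLast?_concat hnn'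
      rw [List.foldl_cons, hstep]
      refine ⟨hih.1, hih.2.1, ?_⟩
      rw [hih.2.2]
      have hga : rs.getLast hne = a := by
        have hh := List.getLast?_eq_some_getLast (l := rs) hne
        rw [hh] at h; exact Option.some_inj.1 h
      have hsplit : rs.dropLast ++ [a] = rs := by
        conv_rhs => rw [← List.dropLast_append_getLast hne, hga]
      have hmax : (rs.dropLast ++ [a + 1]).foldl max 0 = max (rs.foldl max 0) (a + 1) := by
        conv_rhs => rw [← hsplit]
        rw [List.foldl_append, List.foldl_append]
        simp
      rw [hmax]; simp [scanNV, h1, h2, h3, h4, h5]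

lemma maxGetD (rs : List Int) (hne : rs ≠ []) (hnn : ∀ y ∈ rs, 0 ≤ y) :
    (PySem.List.max? rs (fun x => x)).getD 0 = rs.foldl max 0 := by
  cases rs with
  | nil => exact absurd rfl hne
  | cons x t =>
    rw [PySem.List.max?_id_cons, Option.getD_some, List.foldl_cons]
    have hx : 0 ≤ x := hnn x (List.mem_cons_self ..)
    have : max (0 : Int) x = x := by omega
    rw [this]

-- ===== VERDICT (by name: the statement is the Claim_ definition above) =====
theorem longestSubstringNoVowels_spec : Claim_equal_longestSubstringNoVowels := by
  intro s _
  unfold Spec_longestSubstringNoVowels longestSubstringNoVowels longestSubstringNoVowels_alt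
  rw [PySem.List.foldl_pyRange_zero_pyGetD' s.toList ' ' stepA ([], [])]
  have hA := scanA s.toList [] []
  have hB := scanB s.toList [0] 0 (by simp) (by simp)
  have hM := maxGetD (s.toList.foldl stepB [0]) hB.1 hB.2.1
  simp only [List.length_nil, Nat.cast_zero] at hA
  rw [hA, hM, hB.2.2]
  simp
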